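-- pv_equiv track=rewrite | github.com/Vladimir-Lin/pyAITK | Widgets/Society/PositionListings.py | toAltitudeString
-- ===== SOURCE A (Python) =====
-- def toAltitudeString           ( altitude                         ) :
--   ##########################################################################
--   Z     = int                  ( altitude                                  )
--   V     = int                  ( altitude                                  )
--   K     =                      ( Z >= 0                                    )
--   P     = ""
--   if                           ( not K                                   ) :
--     P   = "-"
--     V   = -V
--   ##########################################################################
--   if                           ( V <= 0                                  ) :
--     return "0"
--   ##########################################################################
--   if                           ( V < 10000                               ) :
--     ########################################################################
--     S   = f"{V}"
--     L   = len                  ( S                                         )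
--     for i in range             ( L , 4                                   ) :
--       S = f"0{S}"
--     ########################################################################
--     return f"{P}0.{S}"
--   ##########################################################################
--   S     = f"{V}"
--   L     = len                  ( S                                         )
--   T     = S                    [ -4 :                                      ]
--   H     = S                    [    : L - 4                                ]
--   ##########################################################################
--   return f"{P}{H}.{T}"
-- ===== SOURCE B (Python) =====
-- def toAltitudeString(altitude):
--     V = int(altitude)
--     if V == 0:
--         return "0"
--     P = "-" if V < 0 else ""
--     whole = abs(V) // 10000
--     frac = abs(V) % 10000
--     return f"{P}{whole}.{frac:04d}"
-- ===== Notes on version B (the rewrite author's own statement) =====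
-- stated objective: simpler
-- what changed: Replaces decimal-string slicing (last-four-characters vs rest) and the explicit zero-prepend loop with an integer division/modulus split at the fourth decimal digit plus a zero-padded format spec, collapsing the small-value special case.
import Mathlib
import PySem

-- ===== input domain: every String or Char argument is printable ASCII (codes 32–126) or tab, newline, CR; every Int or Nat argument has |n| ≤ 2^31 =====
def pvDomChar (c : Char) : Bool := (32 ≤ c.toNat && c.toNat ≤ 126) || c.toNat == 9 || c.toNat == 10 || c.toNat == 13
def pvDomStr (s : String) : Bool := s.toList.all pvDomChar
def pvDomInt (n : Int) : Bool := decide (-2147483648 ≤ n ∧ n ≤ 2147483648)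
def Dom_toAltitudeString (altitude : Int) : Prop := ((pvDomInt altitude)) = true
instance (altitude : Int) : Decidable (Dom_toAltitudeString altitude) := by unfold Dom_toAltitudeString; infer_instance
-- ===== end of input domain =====

-- B replaces A's decimal-string slicing and zero-prepend loop with divmod by 10000 and a 04d-padded fraction (objective: simpler).

-- ===== PORT A =====
def toAltitudeString (altitude : Int) : String :=
  let Z := altitude
  let V := altitude
  let K := decide (Z ≥ 0)
  let P : List Char := if !K then ['-'] else []
  let V := if !K then -V else V
  if V ≤ 0 then "0"
  else if V < 10000 then
    let S := PySem.Int.toChars V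
    let L := PySem.List.len S
    let S := (PySem.List.pyRange L 4 1).foldl (fun S _ => '0' :: S) S
    String.ofList (P ++ '0' :: '.' :: S)
  else
    let S := PySem.Int.toChars V
    let L := PySem.List.len S
    let T := PySem.List.slice S (some (-4)) none
    let H := PySem.List.slice S none (some (L - 4))
    String.ofList (P ++ H ++ '.' :: T)

-- ===== PORT B =====
-- f"{n:04d}" for n ≥ 0: the decimal digits left-padded with '0' to width 4
def pad04 (n : Int) : List Char :=
  let s := PySem.Int.toChars n
  List.replicate (4 - s.length) '0' ++ s

def toAltitudeString_alt (altitude : Int) : String :=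
  let V := altitude
  if V = 0 then "0"
  else
    let P : List Char := if V < 0 then ['-'] else []
    let whole := PySem.Int.floordiv |V| 10000
    let frac := PySem.Int.mod |V| 10000
    String.ofList (P ++ PySem.Int.toChars whole ++ '.' :: pad04 frac)

-- ===== PRECONDITION & SPEC =====
def Spec_toAltitudeString (altitude : Int) (out : String) : Prop := out = toAltitudeString_alt altitude
instance (altitude : Int) (out : String) : Decidable (Spec_toAltitudeString altitude out) := by unfold Spec_toAltitudeString; infer_instance

-- ===== CLAIM (what is proved, stated in full; the proofs are below) =====
def Claim_equal_toAltitudeString : Prop := ∀ (altitude : Int), Dom_toAltitudeString altitude → Spec_toAltitudeString altitude (toAltitudeString altitude)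

-- ===== LEMMAS AND PROOFS =====

-- Nat.toDigits is the reversed digit list rendered with digitChar
lemma toDigitsCore_eq (b : Nat) (hb : 1 < b) :
    ∀ f n acc, 0 < n → n < f →
      Nat.toDigitsCore b f n acc = ((Nat.digits b n).reverse).map Nat.digitChar ++ acc := by
  intro f
  induction f with
  | zero => intro n acc h1 h2; omega
  | succ f ih =>
    intro n acc h1 h2
    rw [Nat.toDigitsCore]
    rw [Nat.digits_def' hb h1]
    by_cases hq : n / b = 0
    · simp [hq, Nat.digits_zero]
    · have hqpos : 0 < n / b := Nat.pos_of_ne_zero hq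
      have hlt : n / b < f := by
        have := Nat.div_lt_self h1 hb
        omega
      rw [if_neg hq, ih (n / b) _ hqpos hlt]
      simp

lemma toDigits_eq (n : Nat) (h : 0 < n) :
    Nat.toDigits 10 n = ((Nat.digits 10 n).reverse).map Nat.digitChar := by
  have := toDigitsCore_eq 10 (by norm_num) (n + 1) n [] h (by omega)
  simpa [Nat.toDigits] using this

lemma toChars_natCast (n : Nat) : PySem.Int.toChars (n : Int) = Nat.toDigits 10 n := by
  simp [PySem.Int.toChars]

lemma digits_len_le_four (r : Nat) (hr : r < 10000) : (Nat.digits 10 r).length ≤ 4 := by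
  by_contra h
  rw [not_le] at h
  rcases Nat.eq_zero_or_pos r with rfl | hpos
  · simp at h
  · have h2 := Nat.base_pow_length_digits_le 10 r (by norm_num) (by omega)
    have h3 : (10:Nat) ^ 5 ≤ 10 ^ (Nat.digits 10 r).length := Nat.pow_le_pow_right (by norm_num) h
    omega

-- the decomposition of the digit-character string of n = 10000*q + r, q ≥ 1
lemma toDigits_split (n : Nat) (h : 10000 ≤ n) :
    Nat.toDigits 10 n
      = Nat.toDigits 10 (n / 10000)
          ++ (List.replicate (4 - (Nat.digits 10 (n % 10000)).length) '0'
          ++ ((Nat.digits 10 (n % 10000)).reverse).map Nat.digitChar) := by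
  set q := n / 10000 with hq
  set r := n % 10000 with hr
  have hqpos : 0 < q := by
    have := Nat.le_div_iff_mul_le (show 0 < 10000 by norm_num) |>.mpr (by omega : 1 * 10000 ≤ n)
    omega
  have hrlt : r < 10000 := Nat.mod_lt _ (by norm_num)
  have hlen : (Nat.digits 10 r).length ≤ 4 := digits_len_le_four r hrlt
  set k := 4 - (Nat.digits 10 r).length with hk
  have hsplit : Nat.digits 10 r ++ List.replicate k 0 ++ Nat.digits 10 q = Nat.digits 10 n := by
    have := Nat.digits_append_zeroes_append_digits (b := 10) (k := k) (m := q) (n := r)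
      (by norm_num) hqpos
    rw [this]
    congr 1
    have h4 : (Nat.digits 10 r).length + k = 4 := by omega
    rw [h4]
    have : n = r + 10000 * q := by
      rw [hq, hr]; omega
    omega
  have hnpos : 0 < n := by omega
  rw [toDigits_eq n hnpos, toDigits_eq q hqpos, ← hsplit]
  simp [List.reverse_append, List.map_append, List.map_replicate]
  exact Or.inr (by decide)

lemma toDigits_len_pos (n : Nat) : 0 < (Nat.toDigits 10 n).length := by
  rcases Nat.eq_zero_or_pos n with rfl | h
  · decide
  · rw [toDigits_eq n h]
    simpa using List.length_pos_of_ne_nil (Nat.digits_ne_nil_iff_ne_zero.mpr (by omega))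

-- pad04 of a (cast) natural is zeros to width 4 before its digits
lemma pad04_natCast (r : Nat) :
    pad04 (r : Int) = List.replicate (4 - (Nat.toDigits 10 r).length) '0' ++ Nat.toDigits 10 r := by
  simp [pad04, toChars_natCast]

-- pad04 r agrees with the digit-list decomposition tail, all r < 10000
lemma pad04_eq_tail (r : Nat) (hr : r < 10000) :
    pad04 (r : Int)
      = List.replicate (4 - (Nat.digits 10 r).length) '0'
          ++ ((Nat.digits 10 r).reverse).map Nat.digitChar := by
  rw [pad04_natCast]
  rcases Nat.eq_zero_or_pos r with rfl | h
  · decide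
  · rw [toDigits_eq r h]
    simp

-- the zero-prepend loop prepends one '0' per element of the list
lemma foldl_prepend_zero (l : List Int) (s : List Char) :
    l.foldl (fun S _ => '0' :: S) s = List.replicate l.length '0' ++ s := by
  induction l generalizing s with
  | nil => simp
  | cons x xs ih => simp [ih, List.replicate_succ']

lemma pyRange_len_four (L : Int) (h1 : 1 ≤ L) (h4 : L ≤ 4) :
    (PySem.List.pyRange L 4 1).length = (4 - L).toNat := by
  interval_cases L <;> decide

-- the small branch: the padding loop builds exactly whole "0" plus the 04d fraction
lemma small_eq (n : Nat) (h1 : 0 < n) (h2 : n < 10000) :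
    '0' :: '.' :: (PySem.List.pyRange (PySem.List.len (PySem.Int.toChars (n:Int))) 4 1).foldl
        (fun S _ => '0' :: S) (PySem.Int.toChars (n:Int))
    = PySem.Int.toChars (PySem.Int.floordiv (n:Int) 10000)
        ++ '.' :: pad04 (PySem.Int.mod (n:Int) 10000) := by
  have hfd : PySem.Int.floordiv (n:Int) 10000 = ((n / 10000 : Nat) : Int) := by
    simp [PySem.Int.floordiv, Int.fdiv_eq_ediv]
  have hmd : PySem.Int.mod (n:Int) 10000 = ((n % 10000 : Nat) : Int) := by
    simp [PySem.Int.mod, Int.fmod_eq_emod]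
  rw [hfd, hmd]
  have hd : n / 10000 = 0 := Nat.div_eq_of_lt h2
  have hm : n % 10000 = n := Nat.mod_eq_of_lt h2
  rw [hd, hm]
  have hc : PySem.Int.toChars ((0:Nat) : Int) = ['0'] := by decide
  rw [hc, toChars_natCast, pad04_natCast]
  have hlen1 : 0 < (Nat.toDigits 10 n).length := toDigits_len_pos n
  have hlen4 : (Nat.toDigits 10 n).length <= 4 := by
    rw [toDigits_eq n h1]
    simpa using digits_len_le_four n h2
  rw [PySem.List.len_eq, foldl_prepend_zero,
    pyRange_len_four _ (by omega) (by omega)]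
  have hcount : ((4:Int) - ((Nat.toDigits 10 n).length : Int)).toNat
      = 4 - (Nat.toDigits 10 n).length := by omega
  rw [hcount]
  simp

-- the big branch: the two slices are the decimal digits of n / 10000 and the padded n % 10000
lemma big_eq (n : Nat) (h : 10000 <= n) :
    PySem.List.slice (PySem.Int.toChars (n:Int)) none
        (some (PySem.List.len (PySem.Int.toChars (n:Int)) - 4))
      ++ '.' :: PySem.List.slice (PySem.Int.toChars (n:Int)) (some (-4)) none
    = PySem.Int.toChars (PySem.Int.floordiv (n:Int) 10000)
        ++ '.' :: pad04 (PySem.Int.mod (n:Int) 10000) := by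
  have hfd : PySem.Int.floordiv (n:Int) 10000 = ((n / 10000 : Nat) : Int) := by
    simp [PySem.Int.floordiv, Int.fdiv_eq_ediv]
  have hmd : PySem.Int.mod (n:Int) 10000 = ((n % 10000 : Nat) : Int) := by
    simp [PySem.Int.mod, Int.fmod_eq_emod]
  rw [hfd, hmd, toChars_natCast, toChars_natCast]
  have hrlt : n % 10000 < 10000 := Nat.mod_lt _ (by norm_num)
  rw [pad04_eq_tail _ hrlt]
  set Tail := List.replicate (4 - (Nat.digits 10 (n % 10000)).length) '0'
      ++ ((Nat.digits 10 (n % 10000)).reverse).map Nat.digitChar with hTail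
  have hsplit := toDigits_split n h
  have hTlen : Tail.length = 4 := by
    have hle := digits_len_le_four _ hrlt
    simp only [hTail, List.length_append, List.length_replicate, List.length_map,
      List.length_reverse]
    omega
  rw [hsplit, PySem.List.len_eq]
  rw [PySem.List.slice_from_neg_ofNat _ 4 (by norm_num)]
  have hb : (0:Int) <= ((Nat.toDigits 10 (n / 10000) ++ Tail).length : Int) - 4 := by
    simp [hTlen]
  rw [PySem.List.slice_to _ hb]
  have htoNat : ((((Nat.toDigits 10 (n / 10000) ++ Tail).length : Int) - 4)).toNat
      = (Nat.toDigits 10 (n / 10000)).length := by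
    simp [hTlen]
  rw [htoNat]
  have hlen2 : (Nat.toDigits 10 (n / 10000) ++ Tail).length - 4
      = (Nat.toDigits 10 (n / 10000)).length := by
    simp [hTlen]
  rw [hlen2]
  rw [List.take_left' rfl, List.drop_left' rfl]

-- both realisable branches of A produce B's divmod/pad rendering, under any sign prefix P
lemma sides_eq (P : List Char) (n : Nat) (hn : 0 < n) :
    (if (n:Int) <= 0 then "0"
     else if (n:Int) < 10000 then
       String.ofList (P ++ '0' :: '.' ::
         (PySem.List.pyRange (PySem.List.len (PySem.Int.toChars (n:Int))) 4 1).foldl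
           (fun S _ => '0' :: S) (PySem.Int.toChars (n:Int)))
     else
       String.ofList (P ++ PySem.List.slice (PySem.Int.toChars (n:Int)) none
           (some (PySem.List.len (PySem.Int.toChars (n:Int)) - 4))
         ++ '.' :: PySem.List.slice (PySem.Int.toChars (n:Int)) (some (-4)) none))
    = String.ofList (P ++ PySem.Int.toChars (PySem.Int.floordiv (n:Int) 10000)
        ++ '.' :: pad04 (PySem.Int.mod (n:Int) 10000)) := by
  rw [if_neg (by omega)]
  by_cases h4 : (n:Int) < 10000
  · rw [if_pos h4]
    simp only [List.append_assoc]
    exact congrArg (fun l => String.ofList (P ++ l)) (small_eq n hn (by exact_mod_cast h4))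
  · rw [if_neg h4]
    simp only [List.append_assoc]
    exact congrArg (fun l => String.ofList (P ++ l)) (big_eq n (by omega))

-- ===== VERDICT (by name: the statement is the Claim_ definition above) =====
theorem toAltitudeString_spec : Claim_equal_toAltitudeString := by
  intro altitude _
  unfold Spec_toAltitudeString toAltitudeString toAltitudeString_alt
  rcases lt_trichotomy altitude 0 with hneg | rfl | hpos
  · obtain ⟨n, hn, hnpos⟩ : ∃ n : Nat, altitude = -(n:Int) ∧ 0 < n :=
      ⟨altitude.natAbs, by omega, by omega⟩
    subst hn
    have e1 : decide ((-(n:Int)) ≥ 0) = false := by simp; omega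
    have e2 : |(-(n:Int))| = ((n:Int)) := by simp
    have e3 : (-(n:Int) = 0) = False := by simp; omega
    have e4 : ((-(n:Int)) < 0) = True := by simp; omega
    simp only [e1, e2, e3, e4, Bool.not_false, if_true, if_false, neg_neg]
    exact sides_eq ['-'] n hnpos
  · simp
  · obtain ⟨n, hn, hnpos⟩ : ∃ n : Nat, altitude = (n:Int) ∧ 0 < n :=
      ⟨altitude.toNat, by omega, by omega⟩
    subst hn
    have e1 : decide (((n:Int)) ≥ 0) = true := by simp
    have e2 : |((n:Int))| = ((n:Int)) := by simp
    have e3 : (((n:Int)) = 0) = False := by simp; omega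
    have e4 : (((n:Int)) < 0) = False := by simp
    simp only [e1, e2, e3, e4, Bool.not_true, if_false]
    exact sides_eq [] n hnpos
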